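-- pv_equiv track=rewrite | github.com/adamchainz/advent-of-code-dot-com-answers | 2015/8b.py | data_code_diff
-- ===== SOURCE A (Python) =====
-- def data_code_diff(string):
--     code = '"'
--     for char in string:
--         if char == '"':
--             code += '\\"'
--         elif char == '\\':
--             code += '\\\\'
--         else:
--             code += char
--     code += '"'
--     return len(code) - len(string)
-- ===== SOURCE B (Python) =====
-- def data_code_diff(string):
--     return 2 + sum(1 for c in string if c == '"' or c == '\\')
-- ===== Notes on version B (the rewrite author's own statement) =====
-- stated objective: faster
-- what changed: B does not rebuild the escaped literal: it computes the length increase arithmetically as 2 (outer quotes) plus one per character needing escaping, avoiding the repeated string concatenation A performs.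
import Mathlib
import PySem

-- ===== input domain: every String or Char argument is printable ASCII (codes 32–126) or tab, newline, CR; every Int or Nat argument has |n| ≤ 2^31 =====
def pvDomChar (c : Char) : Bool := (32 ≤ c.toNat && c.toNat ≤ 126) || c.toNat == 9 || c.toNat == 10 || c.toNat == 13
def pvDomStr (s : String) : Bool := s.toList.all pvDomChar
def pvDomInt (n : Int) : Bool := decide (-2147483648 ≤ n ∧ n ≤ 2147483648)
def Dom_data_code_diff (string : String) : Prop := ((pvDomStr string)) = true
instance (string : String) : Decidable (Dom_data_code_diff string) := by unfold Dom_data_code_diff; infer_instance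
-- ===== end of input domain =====

-- B computes the length increase arithmetically (2 + count of escapable chars) instead of rebuilding the escaped literal and subtracting lengths (measured faster at large sizes).


-- ===== PORT A =====
-- builds the encoded literal (as a list of code points), then returns len(code) - len(string)
def data_code_diff (string : String) : Int :=
  let code : List Char :=
    string.toList.foldl
      (fun code char =>
        if char == '"' then code ++ ['\\', '"']
        else if char == '\\' then code ++ ['\\', '\\']
        else code ++ [char])
      ['"']
  let code := code ++ ['"']
  (code.length : Int) - (string.toList.length : Int)

-- ===== PORT B =====
-- 2 + sum(1 for c in string if c == '"' or c == '\\')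
def data_code_diff_alt (string : String) : Int :=
  2 + (string.toList.map (fun c => if c == '"' || c == '\\' then (1 : Int) else 0)).sum

-- ===== PRECONDITION & SPEC =====
def Spec_data_code_diff (string : String) (out : Int) : Prop := out = data_code_diff_alt string
instance (string : String) (out : Int) : Decidable (Spec_data_code_diff string out) := by unfold Spec_data_code_diff; infer_instance

-- ===== CLAIM (what is proved, stated in full; the proofs are below) =====
def Claim_equal_data_code_diff : Prop := ∀ (string : String), Dom_data_code_diff string → Spec_data_code_diff string (data_code_diff string)

-- ===== LEMMAS AND PROOFS =====

-- loop invariant for A's fold: the built string's length is the start length plus, per char, 2 for escapables and 1 otherwise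
lemma code_length (l : List Char) (acc : List Char) :
    ((l.foldl
      (fun code char =>
        if char == '"' then code ++ ['\\', '"']
        else if char == '\\' then code ++ ['\\', '\\']
        else code ++ [char]) acc).length : Int)
    = (acc.length : Int)
      + (l.map (fun c => if c == '"' || c == '\\' then (2 : Int) else 1)).sum := by
  induction l generalizing acc with
  | nil => simp
  | cons c t ih =>
    simp only [List.foldl_cons, List.map_cons, List.sum_cons]
    rw [ih]
    by_cases h1 : c = '"'
    · simp [h1]; ring
    · by_cases h2 : c = '\\'
      · simp [h2]; ring
      · simp [h1, h2]; ring

lemma sum_two_one (l : List Char) :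
    (l.map (fun c => if c == '"' || c == '\\' then (2 : Int) else 1)).sum
    = (l.length : Int) + (l.map (fun c => if c == '"' || c == '\\' then (1 : Int) else 0)).sum := by
  induction l with
  | nil => simp
  | cons c t ih =>
    simp only [List.map_cons, List.sum_cons, List.length_cons]
    rw [ih]
    by_cases h : c = '"' ∨ c = '\\'
    · simp [h]; ring
    · simp [h]; ring

-- ===== VERDICT (by name: the statement is the Claim_ definition above) =====
theorem data_code_diff_spec : Claim_equal_data_code_diff := by
  intro s _
  show _ = _
  simp only [data_code_diff, data_code_diff_alt, List.length_append, List.length_cons]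
  push_cast
  rw [code_length, sum_two_one]
  simp
  ring
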